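-- pv_equiv track=rewrite | github.com/yandexdataschool/nlp_course | week06_mt/wa/toy_aligner.py | count_word_cooccurrences
-- ===== SOURCE A (Python) =====
-- def count_word_cooccurrences(src_corpus, trg_corpus):
--     # Counts how often pairs of words co-occur in a sentence pair.
--     counts = {}
--     for i, src_sent in enumerate(src_corpus):
--         for src in src_sent:
--             if not src in counts:
--                 counts[src] = {}
--             for trg in trg_corpus[i]:
--                 if not trg in counts[src]:
--                     counts[src][trg] = 0
--                 counts[src][trg] += 1
--     return counts
-- ===== SOURCE B (Python) =====
-- def count_word_cooccurrences(src_corpus, trg_corpus):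
--     # Counts how often pairs of words co-occur in a sentence pair.
--     # Per sentence: count multiplicities once, then add m*n per unique word pair.
--     counts = {}
--     for i, src_sent in enumerate(src_corpus):
--         if not src_sent:
--             continue
--         trg_sent = trg_corpus[i]
--         c_src = {}
--         for w in src_sent:
--             c_src[w] = c_src.get(w, 0) + 1
--         c_trg = {}
--         for w in trg_sent:
--             c_trg[w] = c_trg.get(w, 0) + 1
--         for src, m in c_src.items():
--             row = counts.get(src, {})
--             for trg, n in c_trg.items():
--                 row[trg] = row.get(trg, 0) + m * n
--             counts[src] = row
--     return counts
-- ===== Notes on version B (the rewrite author's own statement) =====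
-- stated objective: alternative
-- what changed: Per sentence B first builds multiplicity counters for the source and target sentence and then adds m*n once per unique word pair, instead of A's +1 update for every occurrence pair.
import Mathlib
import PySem

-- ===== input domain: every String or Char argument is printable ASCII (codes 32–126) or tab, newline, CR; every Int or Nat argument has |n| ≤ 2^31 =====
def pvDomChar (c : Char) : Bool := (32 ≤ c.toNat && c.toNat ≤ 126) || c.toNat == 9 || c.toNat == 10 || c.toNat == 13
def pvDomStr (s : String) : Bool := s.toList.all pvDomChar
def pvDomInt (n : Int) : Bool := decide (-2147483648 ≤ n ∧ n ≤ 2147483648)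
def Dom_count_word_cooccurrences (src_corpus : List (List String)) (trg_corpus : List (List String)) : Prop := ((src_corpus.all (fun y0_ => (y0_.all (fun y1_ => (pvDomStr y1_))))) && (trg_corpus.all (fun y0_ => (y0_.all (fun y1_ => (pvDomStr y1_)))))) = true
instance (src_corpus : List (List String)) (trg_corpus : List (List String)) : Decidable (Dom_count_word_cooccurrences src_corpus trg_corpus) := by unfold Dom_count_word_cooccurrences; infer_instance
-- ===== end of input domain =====

-- B replaces A's +1 update for every occurrence pair by per-sentence multiplicity counters
-- and one m*n update per unique word pair; proved to return the identical dict (same insertion order).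

-- ===== PORT A =====
-- Python mutates counts[src] (a dict) in place; modelled as fetch-row / update / store-back.
-- trg_corpus[i] raises IndexError when out of range; Pre_ excludes that, the port totalizes with [].
def count_word_cooccurrences (src_corpus : List (List String)) (trg_corpus : List (List String)) : List (String × List (String × Int)) :=
  let counts : PySem.Dict String (PySem.Dict String Int) :=
    (PySem.List.enumerate src_corpus).foldl (fun counts p =>
      p.2.foldl (fun counts src =>
        let counts := if counts.contains src then counts else counts.insert src PySem.Dict.empty
        let row := counts.getD src PySem.Dict.empty
        let row := ((PySem.List.pyGet? trg_corpus p.1).getD []).foldl (fun row trg =>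
          let row := if row.contains trg then row else row.insert trg 0
          row.insert trg (row.getD trg 0 + 1)) row
        counts.insert src row) counts) PySem.Dict.empty
  counts.items.map (fun q => (q.1, q.2.items))

-- ===== PORT B =====
def count_word_cooccurrences_alt (src_corpus : List (List String)) (trg_corpus : List (List String)) : List (String × List (String × Int)) :=
  let counts : PySem.Dict String (PySem.Dict String Int) :=
    (PySem.List.enumerate src_corpus).foldl (fun counts p =>
      if p.2.isEmpty then counts else
      let trg_sent := (PySem.List.pyGet? trg_corpus p.1).getD []
      let c_src := p.2.foldl (fun d w => d.insert w (d.getD w 0 + 1)) PySem.Dict.empty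
      let c_trg := trg_sent.foldl (fun d w => d.insert w (d.getD w 0 + 1)) PySem.Dict.empty
      c_src.items.foldl (fun counts q =>
        let row := counts.getD q.1 PySem.Dict.empty
        let row := c_trg.items.foldl (fun row r =>
          row.insert r.1 (row.getD r.1 0 + q.2 * r.2)) row
        counts.insert q.1 row) counts) PySem.Dict.empty
  counts.items.map (fun q => (q.1, q.2.items))

-- ===== PRECONDITION & SPEC =====
-- Pre_ excludes exactly the inputs where Python A raises IndexError: a nonempty source
-- sentence whose index has no target sentence (trg_corpus[i] with i out of range).
def Pre_count_word_cooccurrences (src_corpus : List (List String)) (trg_corpus : List (List String)) : Prop :=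
  ∀ s ∈ src_corpus.drop trg_corpus.length, s = []
instance (src_corpus : List (List String)) (trg_corpus : List (List String)) : Decidable (Pre_count_word_cooccurrences src_corpus trg_corpus) := by unfold Pre_count_word_cooccurrences; infer_instance

def pvWitness_count_word_cooccurrences : List (List String) × List (List String) :=
  ([["a", "b", "a"], ["b"]], [["x", "a", "x"], ["a"]])

def Spec_count_word_cooccurrences (src_corpus : List (List String)) (trg_corpus : List (List String)) (out : List (String × List (String × Int))) : Prop := out = count_word_cooccurrences_alt src_corpus trg_corpus
instance (src_corpus : List (List String)) (trg_corpus : List (List String)) (out : List (String × List (String × Int))) : Decidable (Spec_count_word_cooccurrences src_corpus trg_corpus out) := by unfold Spec_count_word_cooccurrences; infer_instance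

-- ===== CLAIM (what is proved, stated in full; the proofs are below) =====
def Claim_equal_count_word_cooccurrences : Prop := ∀ (src_corpus : List (List String)) (trg_corpus : List (List String)), Dom_count_word_cooccurrences src_corpus trg_corpus → Pre_count_word_cooccurrences src_corpus trg_corpus → Spec_count_word_cooccurrences src_corpus trg_corpus (count_word_cooccurrences src_corpus trg_corpus)

-- ===== LEMMAS AND PROOFS =====

-- A's per-occurrence row update: add 1 to row[t] for every t in T.
def pvAdd (T : List String) (r : PySem.Dict String Int) : PySem.Dict String Int :=
  T.foldl (fun r t => r.insert t (r.getD t 0 + 1)) r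

-- B's scaled row update: add m * (count of t in T) to row[t] for every distinct t of T.
def pvScl (T : List String) (m : Int) (r : PySem.Dict String Int) : PySem.Dict String Int :=
  (PySem.Dict.counter T).items.foldl (fun r p => r.insert p.1 (r.getD p.1 0 + m * p.2)) r

-- two dicts with the same (nodup) key list and the same getD are equal
theorem pv_dict_eq_of_keys_getD {ν : Type} (d d' : PySem.Dict String ν) (d0 : ν)
    (hk : d.keys = d'.keys) (hn : d.keys.Nodup) (hg : ∀ k, d.getD k d0 = d'.getD k d0) :
    d = d' := by
  apply PySem.Dict.ext
  rw [PySem.Dict.items_eq_map_keys d hn d0, PySem.Dict.items_eq_map_keys d' (hk ▸ hn) d0, hk]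
  exact List.map_congr_left (fun k _ => by rw [hg])

theorem pv_update_ofList (K : List String) (T : List String) :
    PySem.Set.update K (PySem.Set.ofList T) = PySem.Set.update K T := by
  rw [PySem.Set.update_eq_append_filter, PySem.Set.update_eq_append_filter, PySem.Set.ofList_ofList]

theorem pv_update_update (K : List String) (T : List String) :
    PySem.Set.update (PySem.Set.update K T) T = PySem.Set.update K T := by
  rw [PySem.Set.update_eq_append_filter (s := PySem.Set.update K T)]
  have h : (PySem.Set.ofList T).filter (fun y => !(PySem.Set.contains (PySem.Set.update K T) y)) = [] := by
    rw [List.filter_eq_nil_iff]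
    intro y hy
    have hyT : y ∈ T := (PySem.Set.mem_ofList T y).mp hy
    simp
    intro _
    exact hyT
  rw [h, List.append_nil]

-- fold inserting at each element of S: the row at k gets F applied (count of k) times
theorem pv_foldl_insert_getD_iterate {ν : Type} (F : ν → ν) (d0 : ν) (S : List String) (k : String) :
    ∀ (c : PySem.Dict String ν),
    (S.foldl (fun c s => c.insert s (F (c.getD s d0))) c).getD k d0 = F^[S.count k] (c.getD k d0) := by
  induction S with
  | nil => intro c; simp
  | cons s S' ih =>
    intro c
    simp only [List.foldl_cons, ih, List.count_cons]
    by_cases h : s = k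
    · subst h
      simp [PySem.Dict.getD_insert_self, Function.iterate_succ_apply]
    · have hne : ¬ (s == k) = true := by simp [h]
      simp [PySem.Dict.getD_insert, Ne.symm h, hne]

-- fold inserting once per distinct key: the row at k gets G k applied once if k ∈ K
theorem pv_foldl_insert_nodup_getD {ν : Type} (G : String → ν → ν) (d0 : ν) (K : List String)
    (hK : K.Nodup) (k : String) :
    ∀ (c : PySem.Dict String ν),
    (K.foldl (fun c s => c.insert s (G s (c.getD s d0))) c).getD k d0
      = if k ∈ K then G k (c.getD k d0) else c.getD k d0 := by
  induction K with
  | nil => intro c; simp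
  | cons s K' ih =>
    intro c
    have hK' : K'.Nodup := hK.of_cons
    simp only [List.foldl_cons, ih hK']
    by_cases h : k = s
    · subst h
      have : k ∉ K' := (List.nodup_cons.mp hK).1
      simp [this, PySem.Dict.getD_insert_self]
    · by_cases hm : k ∈ K' <;> simp [hm, h, PySem.Dict.getD_insert]

theorem pv_keys_pvAdd (T : List String) (r : PySem.Dict String Int) :
    (pvAdd T r).keys = PySem.Set.update r.keys T :=
  PySem.Dict.keys_foldl_insert T (fun r t => r.getD t 0 + 1) r

theorem pv_getD_pvAdd (T : List String) (r : PySem.Dict String Int) (v : String) :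
    (pvAdd T r).getD v 0 = r.getD v 0 + T.count v :=
  PySem.Dict.getD_foldl_insert_add_one T r v

theorem pv_nodup_pvAdd (T : List String) (r : PySem.Dict String Int) (h : r.keys.Nodup) :
    (pvAdd T r).keys.Nodup :=
  PySem.Dict.nodup_keys_foldl_insert T (fun r t => r.getD t 0 + 1) r h

theorem pv_pvScl_eq_foldl (T : List String) (m : Int) (r : PySem.Dict String Int) :
    pvScl T m r = (PySem.Set.ofList T).foldl
      (fun r t => r.insert t (r.getD t 0 + m * (T.count t : Int))) r := by
  unfold pvScl
  rw [PySem.Dict.items_counter, List.foldl_map]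

theorem pv_keys_pvScl (T : List String) (m : Int) (r : PySem.Dict String Int) :
    (pvScl T m r).keys = PySem.Set.update r.keys T := by
  rw [pv_pvScl_eq_foldl,
      PySem.Dict.keys_foldl_insert (PySem.Set.ofList T)
        (fun r t => r.getD t 0 + m * (T.count t : Int)) r,
      pv_update_ofList]

theorem pv_getD_pvScl (T : List String) (m : Int) (r : PySem.Dict String Int) (v : String) :
    (pvScl T m r).getD v 0 = r.getD v 0 + m * T.count v := by
  rw [pv_pvScl_eq_foldl,
      pv_foldl_insert_nodup_getD (fun t x => x + m * (T.count t : Int)) 0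
        (PySem.Set.ofList T) (PySem.Set.nodup_ofList T) v r]
  by_cases h : v ∈ PySem.Set.ofList T
  · simp [h]
  · have hv : v ∉ T := fun hv => h ((PySem.Set.mem_ofList T v).mpr hv)
    simp [h, List.count_eq_zero.mpr hv]

theorem pv_nodup_pvScl (T : List String) (m : Int) (r : PySem.Dict String Int)
    (h : r.keys.Nodup) : (pvScl T m r).keys.Nodup := by
  rw [pv_pvScl_eq_foldl]
  exact PySem.Dict.nodup_keys_foldl_insert (PySem.Set.ofList T)
    (fun r t => r.getD t 0 + m * (T.count t : Int)) r h

-- core row lemma: n+1 per-occurrence passes = one scaled pass with multiplicity n+1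
theorem pv_iter_pvAdd_eq_pvScl (T : List String) :
    ∀ (n : Nat) (r : PySem.Dict String Int), r.keys.Nodup →
    (pvAdd T)^[n + 1] r = pvScl T ((n : Int) + 1) r := by
  intro n
  induction n with
  | zero =>
    intro r hr
    refine pv_dict_eq_of_keys_getD _ _ 0 ?_ ?_ ?_
    · rw [Function.iterate_one, pv_keys_pvAdd, pv_keys_pvScl]
    · rw [Function.iterate_one]; exact pv_nodup_pvAdd T r hr
    · intro v
      rw [Function.iterate_one, pv_getD_pvAdd, pv_getD_pvScl]
      ring
  | succ n ih =>
    intro r hr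
    rw [Function.iterate_succ_apply', ih r hr]
    refine pv_dict_eq_of_keys_getD _ _ 0 ?_ ?_ ?_
    · rw [pv_keys_pvAdd, pv_keys_pvScl, pv_keys_pvScl, pv_update_update]
    · exact pv_nodup_pvAdd T _ (pv_nodup_pvScl T _ r hr)
    · intro v
      rw [pv_getD_pvAdd, pv_getD_pvScl, pv_getD_pvScl]
      push_cast
      ring

theorem pv_nodup_iter_pvAdd (T : List String) :
    ∀ (n : Nat) (r : PySem.Dict String Int), r.keys.Nodup → ((pvAdd T)^[n] r).keys.Nodup := by
  intro n
  induction n with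
  | zero => intro r hr; simpa using hr
  | succ n ih =>
    intro r hr
    rw [Function.iterate_succ_apply']
    exact pv_nodup_pvAdd T _ (ih r hr)

-- the invariant carried through the corpus loop
def pvInv (c : PySem.Dict String (PySem.Dict String Int)) : Prop :=
  c.keys.Nodup ∧ ∀ k, (c.getD k PySem.Dict.empty).keys.Nodup

-- per-sentence step of A (simplified form) equals per-sentence step of B
theorem pv_step_eq (T S : List String) (c : PySem.Dict String (PySem.Dict String Int))
    (hc : pvInv c) :
    S.foldl (fun c s => c.insert s (pvAdd T (c.getD s PySem.Dict.empty))) c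
      = (PySem.Dict.counter S).items.foldl
          (fun c q => c.insert q.1 (pvScl T q.2 (c.getD q.1 PySem.Dict.empty))) c := by
  refine pv_dict_eq_of_keys_getD _ _ PySem.Dict.empty ?_ ?_ ?_
  · rw [PySem.Dict.keys_foldl_insert S (fun c s => pvAdd T (c.getD s PySem.Dict.empty)) c,
        PySem.Dict.keys_foldl_insert_key (PySem.Dict.counter S).items Prod.fst
          (fun c q => pvScl T q.2 (c.getD q.1 PySem.Dict.empty)) c]
    have : (PySem.Dict.counter S).items.map Prod.fst = PySem.Set.ofList S := by
      have h1 : (Prod.fst ∘ fun k => (k, (S.count k : Int))) = id := rfl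
      rw [PySem.Dict.items_counter, List.map_map, h1, List.map_id]
    rw [this, pv_update_ofList]
  · exact PySem.Dict.nodup_keys_foldl_insert S
      (fun c s => pvAdd T (c.getD s PySem.Dict.empty)) c hc.1
  · intro k
    rw [pv_foldl_insert_getD_iterate (pvAdd T) PySem.Dict.empty S k c]
    rw [PySem.Dict.items_counter, List.foldl_map,
        pv_foldl_insert_nodup_getD
          (fun s row => pvScl T ((S.count s : Int)) row) PySem.Dict.empty
          (PySem.Set.ofList S) (PySem.Set.nodup_ofList S) k c]
    by_cases h : k ∈ S
    · have hmem : k ∈ PySem.Set.ofList S := (PySem.Set.mem_ofList S k).mpr h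
      obtain ⟨n, hn⟩ : ∃ n, S.count k = n + 1 :=
        ⟨S.count k - 1, by have := List.count_pos_iff.mpr h; omega⟩
      simp only [hmem, if_pos, hn]
      rw [pv_iter_pvAdd_eq_pvScl T n _ (hc.2 k)]
      norm_num
    · have hmem : k ∉ PySem.Set.ofList S := fun hm => h ((PySem.Set.mem_ofList S k).mp hm)
      simp [hmem, List.count_eq_zero.mpr h]

-- the invariant is preserved by A's per-sentence step
theorem pv_step_pres (T S : List String) (c : PySem.Dict String (PySem.Dict String Int))
    (hc : pvInv c) :
    pvInv (S.foldl (fun c s => c.insert s (pvAdd T (c.getD s PySem.Dict.empty))) c) := by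
  constructor
  · exact PySem.Dict.nodup_keys_foldl_insert S
      (fun c s => pvAdd T (c.getD s PySem.Dict.empty)) c hc.1
  · intro k
    rw [pv_foldl_insert_getD_iterate (pvAdd T) PySem.Dict.empty S k c]
    exact pv_nodup_iter_pvAdd T _ _ (hc.2 k)

-- A's raw inner row loop is pvAdd
theorem pv_innerA_eq (T : List String) (r : PySem.Dict String Int) :
    T.foldl (fun row trg =>
        let row := if row.contains trg then row else row.insert trg 0
        row.insert trg (row.getD trg 0 + 1)) r = pvAdd T r := by
  unfold pvAdd
  congr 1
  funext r t
  by_cases h : r.contains t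
  · simp [h]
  · simp only [h, Bool.false_eq_true, if_false]
    rw [PySem.Dict.getD_insert_self, PySem.Dict.insert_insert_self,
        PySem.Dict.getD_of_not_contains r 0 (by rwa [Bool.not_eq_true] at h)]

-- A's raw per-source-occurrence step is the simplified insert step
theorem pv_stepA_eq (T S : List String) (c : PySem.Dict String (PySem.Dict String Int)) :
    S.foldl (fun counts src =>
        let counts := if counts.contains src then counts else counts.insert src PySem.Dict.empty
        let row := counts.getD src PySem.Dict.empty
        let row := T.foldl (fun row trg =>
          let row := if row.contains trg then row else row.insert trg 0
          row.insert trg (row.getD trg 0 + 1)) row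
        counts.insert src row) c
      = S.foldl (fun c s => c.insert s (pvAdd T (c.getD s PySem.Dict.empty))) c := by
  congr 1
  funext c s
  simp only [pv_innerA_eq]
  by_cases h : c.contains s
  · simp [h]
  · simp only [h, Bool.false_eq_true, if_false]
    rw [PySem.Dict.getD_insert_self, PySem.Dict.insert_insert_self,
        PySem.Dict.getD_of_not_contains c PySem.Dict.empty (by rwa [Bool.not_eq_true] at h)]

-- the corpus-level folds of the two ports agree (and keep the invariant)
theorem pv_outer (trg_corpus : List (List String)) :
    ∀ (l : List (Int × List String)) (c : PySem.Dict String (PySem.Dict String Int)), pvInv c →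
    l.foldl (fun counts p =>
      p.2.foldl (fun counts src =>
        let counts := if counts.contains src then counts else counts.insert src PySem.Dict.empty
        let row := counts.getD src PySem.Dict.empty
        let row := ((PySem.List.pyGet? trg_corpus p.1).getD []).foldl (fun row trg =>
          let row := if row.contains trg then row else row.insert trg 0
          row.insert trg (row.getD trg 0 + 1)) row
        counts.insert src row) counts) c
    = l.foldl (fun counts p =>
      if p.2.isEmpty then counts else
      let trg_sent := (PySem.List.pyGet? trg_corpus p.1).getD []
      let c_src := p.2.foldl (fun d w => d.insert w (d.getD w 0 + 1)) PySem.Dict.empty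
      let c_trg := trg_sent.foldl (fun d w => d.insert w (d.getD w 0 + 1)) PySem.Dict.empty
      c_src.items.foldl (fun counts q =>
        let row := counts.getD q.1 PySem.Dict.empty
        let row := c_trg.items.foldl (fun row r =>
          row.insert r.1 (row.getD r.1 0 + q.2 * r.2)) row
        counts.insert q.1 row) counts) c := by
  intro l
  induction l with
  | nil => intro c _; rfl
  | cons p l' ih =>
    intro c hc
    simp only [List.foldl_cons]
    by_cases hE : p.2.isEmpty
    · rw [List.isEmpty_iff.mp hE]
      simp only [List.foldl_nil, List.isEmpty_nil, if_true]
      exact ih c hc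
    · rw [if_neg (by simp [hE])]
      rw [pv_stepA_eq ((PySem.List.pyGet? trg_corpus p.1).getD []) p.2 c]
      rw [PySem.Dict.foldl_insert_getD_add_one_eq_counter,
          PySem.Dict.foldl_insert_getD_add_one_eq_counter]
      rw [pv_step_eq ((PySem.List.pyGet? trg_corpus p.1).getD []) p.2 c hc]
      exact ih _ (by
        rw [← pv_step_eq ((PySem.List.pyGet? trg_corpus p.1).getD []) p.2 c hc]
        exact pv_step_pres _ _ c hc)

-- ===== VERDICT (by name: the statement is the Claim_ definition above) =====
theorem count_word_cooccurrences_spec : Claim_equal_count_word_cooccurrences := by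
  intro src_corpus trg_corpus _dom _pre
  unfold Spec_count_word_cooccurrences count_word_cooccurrences count_word_cooccurrences_alt
  have hinv : pvInv PySem.Dict.empty := by
    constructor
    · simp [PySem.Dict.keys_empty]
    · intro k; simp [PySem.Dict.getD_empty, PySem.Dict.keys_empty]
  rw [pv_outer trg_corpus (PySem.List.enumerate src_corpus) PySem.Dict.empty hinv]
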